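-- pv_equiv track=rewrite | github.com/sitnaltax/aoc2023 | 12/12b-broad.py | count_of_possible_patterns
-- ===== SOURCE A (Python) =====
-- def evaluate_pattern_exactly(pattern, criteria):
--     blocks = [token for token in pattern.split('.') if len(token) > 0]
--     if len(blocks) != len(criteria):
--         return False
--     for (index, block) in enumerate(blocks):
--         if len(block) != int(criteria[index]):
--             return False
--     return True
--
-- def evaluate_pattern_leniently(pattern, criteria):
--     blocks = [token for token in pattern.split('.') if len(token) > 0]
--     for (index, block) in enumerate(blocks):
--         if block.find("?") > -1:
--             return True
--         if index >= len(criteria):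
--             return False
--         if len(block) != int(criteria[index]):
--             return False
--     return True
--
-- def count_of_possible_patterns(pattern, criteria):
--     if not evaluate_pattern_leniently(pattern, criteria):
--         return 0
--     if pattern.find("?") == -1:
--         return 1 if evaluate_pattern_exactly(pattern, criteria) else 0
--     else:
--         total_of_children = 0
--         return count_of_possible_patterns(pattern.replace("?", ".", 1), criteria) + count_of_possible_patterns(pattern.replace("?", "#", 1), criteria)
-- ===== SOURCE B (Python) =====
-- def count_of_possible_patterns(pattern, criteria):
--     # Memoized DP over states (i, j, run): position in pattern, index into criteria,
--     # and length of the current unfinished block.  The recurrence is evaluated with an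
--     # explicit work stack (no call recursion), so arbitrarily long patterns are fine.
--     crit = [int(c) for c in criteria]
--     n = len(pattern)
--     m = len(crit)
--     memo = {}
--
--     def children(i, j, run):
--         # child states of (i, j, run), each contributing its own count
--         ch = pattern[i]
--         kids = []
--         if ch == '.' or ch == '?':            # treat this cell as a separator
--             if run == 0:
--                 kids.append((i + 1, j, 0))
--             elif j < m and crit[j] == run:
--                 kids.append((i + 1, j + 1, 0))
--         if ch != '.':                         # treat this cell as filled
--             kids.append((i + 1, j, run + 1))
--         return kids
--
--     stack = [(0, 0, 0)]
--     while stack: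
--         state = stack[-1]
--         if state in memo:
--             stack.pop()
--             continue
--         i, j, run = state
--         if i == n:
--             if run == 0:
--                 memo[state] = 1 if j == m else 0
--             else:
--                 memo[state] = 1 if (j < m and crit[j] == run and j + 1 == m) else 0
--             stack.pop()
--             continue
--         kids = children(i, j, run)
--         missing = [k for k in kids if k not in memo]
--         if missing:
--             stack.extend(missing)
--         else:
--             memo[state] = sum(memo[k] for k in kids)
--             stack.pop()
--     return memo[(0, 0, 0)]
-- ===== Notes on version B (the rewrite author's own statement) =====
-- stated objective: alternative
-- what changed: Replaces A's exponential branch-on-each-'?' recursion (with a lenient-prefix prune and repeated re-splitting of the whole pattern) by a memoized DP over (pattern position, criteria index, current run length), evaluated iteratively with an explicit stack.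
import Mathlib
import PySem

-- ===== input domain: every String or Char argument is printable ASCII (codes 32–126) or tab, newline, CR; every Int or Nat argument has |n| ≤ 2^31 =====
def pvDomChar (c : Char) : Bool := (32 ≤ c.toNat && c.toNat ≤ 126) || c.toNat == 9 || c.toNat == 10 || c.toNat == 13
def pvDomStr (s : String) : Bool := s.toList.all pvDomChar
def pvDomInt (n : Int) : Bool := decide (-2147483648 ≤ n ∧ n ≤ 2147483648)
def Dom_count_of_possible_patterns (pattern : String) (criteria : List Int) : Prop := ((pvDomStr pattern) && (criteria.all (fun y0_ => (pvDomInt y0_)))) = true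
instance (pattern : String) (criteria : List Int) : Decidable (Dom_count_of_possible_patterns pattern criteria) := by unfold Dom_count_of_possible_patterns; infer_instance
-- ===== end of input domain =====

-- B replaces A's exponential branch-on-each-'?' recursion by a memoized DP over
-- (position, criteria index, current run length), evaluated with an explicit stack;
-- objective: alternative (a genuinely different algorithm, not measured faster).

-- ===== PORT A =====
-- Python string functions are ported through PySem.Chars on pattern.toList (exact on the domain).

-- exact port of s.replace("?", c, 1) for a single-character pattern and replacement
def pvReplaceFirstQ (c : Char) : List Char → List Char
  | [] => []
  | x :: xs => if x = '?' then c :: xs else x :: pvReplaceFirstQ c xs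

-- the 'for (index, block) in enumerate(blocks)' loop of evaluate_pattern_exactly
-- (criteria[index] is in range there thanks to the preceding length check, so getD is exact;
--  int(criteria[index]) is the identity on an int)
def pvExLoop (criteria : List Int) : List (List Char) → Nat → Bool
  | [], _ => true
  | b :: bs, i => if (b.length : Int) ≠ criteria.getD i 0 then false else pvExLoop criteria bs (i + 1)

def evaluate_pattern_exactly (cs : List Char) (criteria : List Int) : Bool :=
  let blocks := (PySem.Chars.splitOn cs ['.']).filter (fun t => 0 < t.length)
  if blocks.length ≠ criteria.length then false else pvExLoop criteria blocks 0

-- the loop of evaluate_pattern_leniently ('index >= len(criteria)' guards the access, so getD is exact)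
def pvLenLoop (criteria : List Int) : List (List Char) → Nat → Bool
  | [], _ => true
  | b :: bs, i =>
    if -1 < PySem.Chars.find b ['?'] then true
    else if criteria.length ≤ i then false
    else if (b.length : Int) ≠ criteria.getD i 0 then false
    else pvLenLoop criteria bs (i + 1)

def evaluate_pattern_leniently (cs : List Char) (criteria : List Int) : Bool :=
  pvLenLoop criteria ((PySem.Chars.splitOn cs ['.']).filter (fun t => 0 < t.length)) 0

-- cited by countA's decreasing_by: replacing the first '?' strictly decreases the '?' count
lemma pvReplaceFirstQ_count_lt (c : Char) (hc : c ≠ '?') :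
    ∀ cs : List Char, '?' ∈ cs → (pvReplaceFirstQ c cs).count '?' < cs.count '?' := by
  intro cs
  induction cs with
  | nil => intro h; cases h
  | cons x xs ih =>
    intro h
    by_cases hx : x = '?'
    · subst hx
      simp [pvReplaceFirstQ, hc]
    · rcases List.mem_cons.mp h with h | h
      · exact absurd h.symm hx
      · have := ih h
        simp only [pvReplaceFirstQ, if_neg hx, List.count_cons]
        omega

def countA (criteria : List Int) (cs : List Char) : Int :=
  if evaluate_pattern_leniently cs criteria = false then 0
  else if _h2 : PySem.Chars.find cs ['?'] = -1 then
    (if evaluate_pattern_exactly cs criteria then 1 else 0)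
  else
    countA criteria (pvReplaceFirstQ '.' cs) + countA criteria (pvReplaceFirstQ '#' cs)
termination_by cs.count '?'
decreasing_by
  all_goals
    exact pvReplaceFirstQ_count_lt _ (by decide) cs
      ((List.singleton_infix_iff _ _).mp ((PySem.Chars.find_ne_neg_one_iff cs ['?']).mp _h2))

def count_of_possible_patterns (pattern : String) (criteria : List Int) : Int :=
  countA criteria pattern.toList

-- ===== PORT B =====
-- the memoized DP recurrence of Source B over states (i, j, run); Source B evaluates it with a memo
-- table and an explicit work stack, which is semantically the recurrence itself, so it is
-- ported as the structural recursion on the pattern suffix pattern[i:]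
-- (crit = [int(c) for c in criteria] is the identity on a list of ints)
def goB (criteria : List Int) : List Char → Nat → Nat → Int
  | [], j, run =>
    if run = 0 then (if j = criteria.length then 1 else 0)
    else if j < criteria.length ∧ criteria.getD j 0 = (run : Int) ∧ j + 1 = criteria.length then 1 else 0
  | c :: cs, j, run =>
    (if c = '.' ∨ c = '?' then
       (if run = 0 then goB criteria cs j 0
        else if j < criteria.length ∧ criteria.getD j 0 = (run : Int) then goB criteria cs (j + 1) 0
        else 0)
     else 0)
    + (if c ≠ '.' then goB criteria cs j (run + 1) else 0)

def count_of_possible_patterns_alt (pattern : String) (criteria : List Int) : Int :=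
  goB criteria pattern.toList 0 0

-- ===== PRECONDITION & SPEC =====
def Spec_count_of_possible_patterns (pattern : String) (criteria : List Int) (out : Int) : Prop := out = count_of_possible_patterns_alt pattern criteria
instance (pattern : String) (criteria : List Int) (out : Int) : Decidable (Spec_count_of_possible_patterns pattern criteria out) := by unfold Spec_count_of_possible_patterns; infer_instance

-- ===== CLAIM (what is proved, stated in full; the proofs are below) =====
def Claim_equal_count_of_possible_patterns : Prop := ∀ (pattern : String) (criteria : List Int), Dom_count_of_possible_patterns pattern criteria → Spec_count_of_possible_patterns pattern criteria (count_of_possible_patterns pattern criteria)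

-- ===== LEMMAS AND PROOFS =====

-- token extraction with the current partial block carried in order:
-- pvTok cur cs = the nonempty '.'-separated blocks of (cur ++ cs), cur containing no '.'
def pvTok : List Char → List Char → List (List Char)
  | cur, [] => if cur = [] then [] else [cur]
  | cur, c :: rest =>
    if c = '.' then (if cur = [] then pvTok [] rest else cur :: pvTok [] rest)
    else pvTok (cur ++ [c]) rest

-- reference model of PySem.Chars.splitOn _ ['.'] with reversed current-piece accumulator
def pvSplitM : List Char → List Char → List (List Char)
  | cur, [] => [cur.reverse]
  | cur, c :: rest => if c = '.' then cur.reverse :: pvSplitM [] rest else pvSplitM (c :: cur) rest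

lemma pvSplitOn_go_eq : ∀ (fuel : Nat) (l cur : List Char) (acc : List (List Char)),
    l.length < fuel →
    PySem.Chars.splitOn.go ['.'] fuel l cur acc = acc.reverse ++ pvSplitM cur l := by
  intro fuel
  induction fuel with
  | zero => intro l cur acc h; omega
  | succ fuel ih =>
    intro l cur acc h
    cases l with
    | nil => simp [PySem.Chars.splitOn.go, pvSplitM]
    | cons c rest =>
      simp only [PySem.Chars.splitOn.go, List.isPrefixOf, pvSplitM]
      by_cases hc : c = '.'
      · subst hc
        simp only [List.length_cons] at h
        simp [ih rest [] (cur.reverse :: acc) (by omega)]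
      · simp only [List.length_cons] at h
        simp [ih rest (c :: cur) acc (by omega), hc]
        intro hh
        exact absurd hh.symm hc

lemma pvSplitM_filter : ∀ (cs cur : List Char),
    (pvSplitM cur cs).filter (fun t => 0 < t.length) = pvTok cur.reverse cs := by
  intro cs
  induction cs with
  | nil =>
    intro cur
    by_cases h : cur = []
    · subst h; simp [pvSplitM, pvTok]
    · have : cur.reverse ≠ [] := by simpa using h
      simp [pvSplitM, pvTok, this, List.length_pos_iff]
  | cons c rest ih =>
    intro cur
    by_cases hc : c = '.'
    · subst hc
      by_cases h : cur = []
      · subst h; simp [pvSplitM, pvTok, ih []]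
      · have hr : cur.reverse ≠ [] := by simpa using h
        rw [show pvSplitM cur ('.' :: rest) = cur.reverse :: pvSplitM [] rest from by simp [pvSplitM]]
        rw [List.filter_cons_of_pos (by simpa [List.length_pos_iff] using hr), ih []]
        simp [pvTok, hr]
    · have : (c :: cur).reverse = cur.reverse ++ [c] := by simp
      simp [pvSplitM, pvTok, hc, ih (c :: cur), this]

lemma pvBlocks_eq (cs : List Char) :
    (PySem.Chars.splitOn cs ['.']).filter (fun t => 0 < t.length) = pvTok [] cs := by
  rw [PySem.Chars.splitOn, pvSplitOn_go_eq (cs.length + 1) cs [] [] (by omega)]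
  simpa using pvSplitM_filter cs []

lemma pvFindQ_mem (b : List Char) : (-1 < PySem.Chars.find b ['?']) ↔ '?' ∈ b := by
  rw [show (-1 < PySem.Chars.find b ['?']) ↔ 0 ≤ PySem.Chars.find b ['?'] by omega]
  rw [PySem.Chars.find_nonneg_iff]
  exact List.singleton_infix_iff _ _

lemma pvTok_head_ext : ∀ (cs cur : List Char), cur ≠ [] →
    ∃ ext bs, pvTok cur cs = (cur ++ ext) :: bs := by
  intro cs
  induction cs with
  | nil => intro cur h; exact ⟨[], [], by simp [pvTok, h]⟩
  | cons c rest ih =>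
    intro cur h
    by_cases hc : c = '.'
    · subst hc; exact ⟨[], pvTok [] rest, by simp [pvTok, h]⟩
    · obtain ⟨ext, bs, hx⟩ := ih (cur ++ [c]) (by simp)
      exact ⟨[c] ++ ext, bs, by simp [pvTok, hc, hx]⟩


lemma pvPrune (criteria : List Int) : ∀ (cs cur : List Char) (j : Nat), '?' ∉ cur →
    pvLenLoop criteria (pvTok cur cs) j = false → goB criteria cs j cur.length = 0 := by
  intro cs
  induction cs with
  | nil =>
    intro cur j hq hlen
    by_cases h : cur = []
    · subst h; simp [pvTok, pvLenLoop] at hlen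
    · have hfq : ¬ (-1 < PySem.Chars.find cur ['?']) := by rw [pvFindQ_mem]; exact hq
      rw [pvTok, if_neg h, pvLenLoop, if_neg hfq] at hlen
      have hne : cur.length ≠ 0 := by simpa [List.length_eq_zero_iff] using h
      rw [goB, if_neg hne]
      by_cases h1 : criteria.length ≤ j
      · rw [if_neg]; rintro ⟨hj, -, -⟩; omega
      · rw [if_neg h1] at hlen
        by_cases h2 : (cur.length : Int) ≠ criteria.getD j 0
        · rw [if_neg]; rintro ⟨-, hgd, -⟩; exact h2 hgd.symm
        · rw [if_neg h2] at hlen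
          simp [pvLenLoop] at hlen
  | cons c rest ih =>
    intro cur j hq hlen
    by_cases hc : c = '.'
    · subst hc
      by_cases h : cur = []
      · rw [pvTok, if_pos rfl, if_pos h] at hlen
        subst h
        have := ih [] j (by simp) hlen
        simp only [List.length_nil] at this ⊢
        simp [goB, this]
      · have hfq : ¬ (-1 < PySem.Chars.find cur ['?']) := by rw [pvFindQ_mem]; exact hq
        rw [pvTok, if_pos rfl, if_neg h, pvLenLoop, if_neg hfq] at hlen
        have hne : cur.length ≠ 0 := by simpa [List.length_eq_zero_iff] using h
        rw [goB]
        rw [if_pos (Or.inl rfl), if_neg hne, if_neg (show ¬ ('.' ≠ '.') by simp)]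
        by_cases h1 : criteria.length ≤ j
        · rw [if_neg (by rintro ⟨hj, -⟩; omega)]; ring
        · rw [if_neg h1] at hlen
          by_cases h2 : (cur.length : Int) ≠ criteria.getD j 0
          · rw [if_neg (by rintro ⟨-, hgd⟩; exact h2 hgd.symm)]; ring
          · rw [if_neg h2] at hlen
            have := ih [] (j + 1) (by simp) hlen
            simp only [List.length_nil] at this
            rw [if_pos ⟨not_le.mp h1, (not_not.mp h2).symm⟩, this]
            ring
    · by_cases hcq : c = '?'
      · subst hcq
        obtain ⟨ext, bs, hx⟩ := pvTok_head_ext rest (cur ++ ['?']) (by simp)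
        rw [pvTok, if_neg (by decide), hx, pvLenLoop,
            if_pos (by rw [pvFindQ_mem]; simp)] at hlen
        cases hlen
      · have hmem : '?' ∉ cur ++ [c] := by
          simp only [List.mem_append, List.mem_singleton, not_or]
          exact ⟨hq, fun hh => hcq hh.symm⟩
        have := ih (cur ++ [c]) j hmem (by rw [pvTok, if_neg hc] at hlen; exact hlen)
        simp only [List.length_append, List.length_singleton] at this
        rw [goB, if_neg (by rintro (h | h); exact hc h; exact hcq h), if_pos hc, this]
        ring

lemma pvExact (criteria : List Int) : ∀ (cs cur : List Char) (j : Nat), '?' ∉ cs → '?' ∉ cur →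
    j ≤ criteria.length →
    goB criteria cs j cur.length =
      if ((pvTok cur cs).length + j = criteria.length ∧ pvExLoop criteria (pvTok cur cs) j = true)
      then 1 else 0 := by
  intro cs
  induction cs with
  | nil =>
    intro cur j _ hq hj
    by_cases h : cur = []
    · subst h
      simp only [pvTok, List.length_nil, goB, reduceIte]
      by_cases hjl : j = criteria.length
      · simp [hjl, pvExLoop]
      · simp [hjl]
    · have hne : cur.length ≠ 0 := by simpa [List.length_eq_zero_iff] using h
      rw [pvTok, if_neg h, goB, if_neg hne]
      simp only [List.length_singleton, pvExLoop]
      by_cases h2 : (cur.length : Int) ≠ criteria.getD j 0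
      · rw [if_neg (by rintro ⟨-, hgd, -⟩; exact h2 hgd.symm),
          if_neg (by rintro ⟨-, hex⟩; rw [if_pos h2] at hex; cases hex)]
      · rw [if_neg h2]
        by_cases h1 : 1 + j = criteria.length
        · rw [if_pos ⟨by omega, (not_not.mp h2).symm, by omega⟩, if_pos ⟨h1, rfl⟩]
        · rw [if_neg (by rintro ⟨-, -, hh⟩; omega), if_neg (by rintro ⟨hh, -⟩; omega)]
  | cons c rest ih =>
    intro cur j hqs hq hj
    have hqr : '?' ∉ rest := fun hh => hqs (List.mem_cons_of_mem _ hh)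
    have hcq : c ≠ '?' := fun hh => hqs (by rw [hh]; exact List.mem_cons_self ..)
    by_cases hc : c = '.'
    · subst hc
      rw [goB, if_pos (Or.inl rfl), if_neg (show ¬ ('.' ≠ '.') by simp)]
      by_cases h : cur = []
      · subst h
        rw [pvTok, if_pos rfl, if_pos rfl]
        have hrec := ih [] j hqr (by simp) hj
        simp only [List.length_nil] at hrec
        simp [hrec]
      · have hne : cur.length ≠ 0 := by simpa [List.length_eq_zero_iff] using h
        rw [pvTok, if_pos rfl, if_neg h, if_neg hne]
        simp only [List.length_cons, pvExLoop]
        by_cases h2 : (cur.length : Int) ≠ criteria.getD j 0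
        · rw [if_neg (by rintro ⟨-, hgd⟩; exact h2 hgd.symm),
            if_neg (by rintro ⟨-, hex⟩; rw [if_pos h2] at hex; cases hex)]
          ring
        · simp only [if_neg h2]
          by_cases h1 : j < criteria.length
          · rw [if_pos ⟨h1, (not_not.mp h2).symm⟩]
            have hrec := ih [] (j + 1) hqr (by simp) (by omega)
            simp only [List.length_nil] at hrec
            rw [hrec, show (pvTok [] rest).length + (j + 1) = (pvTok [] rest).length + 1 + j from by omega]
            ring
          · -- j = criteria.length, but then getD j 0 = 0 ≠ cur.length
            exfalso
            have : criteria.getD j 0 = 0 := List.getD_eq_default _ _ (by omega)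
            rw [this] at h2
            exact hne (by exact_mod_cast not_not.mp h2)
    · rw [goB, if_neg (by rintro (h | h); exact hc h; exact hcq h), if_pos hc]
      have hmem : '?' ∉ cur ++ [c] := by
        simp only [List.mem_append, List.mem_singleton, not_or]
        exact ⟨hq, fun hh => hcq hh.symm⟩
      have := ih (cur ++ [c]) j hqr hmem hj
      simp only [List.length_append, List.length_singleton] at this
      rw [this, pvTok, if_neg hc]
      ring

lemma pvSplitQ (criteria : List Int) : ∀ (a b : List Char) (j run : Nat), '?' ∉ a →
    goB criteria (a ++ '?' :: b) j run =
      goB criteria (a ++ '.' :: b) j run + goB criteria (a ++ '#' :: b) j run := by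
  intro a
  induction a with
  | nil =>
    intro b j run _
    have e3 : ¬ (('#':Char) = '.' ∨ ('#':Char) = '?') := by decide
    have e4 : ('?':Char) ≠ '.' := by decide
    have e5 : ¬ (('.':Char) ≠ '.') := by decide
    have e6 : ('#':Char) ≠ '.' := by decide
    simp only [List.nil_append, goB, if_neg e3, if_pos e4, if_neg e5, if_pos e6]
    simp only [true_or, or_true, if_true]
    ring
  | cons c a ih =>
    intro b j run hq
    have hcq : c ≠ '?' := fun hh => hq (by rw [hh]; exact List.mem_cons_self ..)
    have hqa : '?' ∉ a := fun hh => hq (List.mem_cons_of_mem _ hh)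
    simp only [List.cons_append, goB]
    rw [ih b j 0 hqa, ih b (j + 1) 0 hqa, ih b j (run + 1) hqa]
    split_ifs <;> ring

lemma pvReplaceFirst_decomp : ∀ (cs : List Char), '?' ∈ cs →
    ∃ a b, '?' ∉ a ∧ cs = a ++ '?' :: b ∧ ∀ c, pvReplaceFirstQ c cs = a ++ c :: b := by
  intro cs
  induction cs with
  | nil => intro h; cases h
  | cons x xs ih =>
    intro h
    by_cases hx : x = '?'
    · subst hx
      exact ⟨[], xs, by simp, rfl, fun c => by simp [pvReplaceFirstQ]⟩
    · have hmem : '?' ∈ xs := by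
        rcases List.mem_cons.mp h with h | h
        · exact absurd h.symm hx
        · exact h
      obtain ⟨a, b, hqa, hab, hrep⟩ := ih hmem
      exact ⟨x :: a, b, by
          simp only [List.mem_cons, not_or]
          exact ⟨fun hh => hx hh.symm, hqa⟩,
        by rw [hab]; rfl,
        fun c => by simp [pvReplaceFirstQ, hx, hrep c]⟩

lemma pvNoQ (criteria : List Int) (cs : List Char) (h : '?' ∉ cs) :
    countA criteria cs = goB criteria cs 0 0 := by
  rw [countA]
  have hfind : PySem.Chars.find cs ['?'] = -1 :=
    (PySem.Chars.find_eq_neg_one_iff _ _).mpr (fun hin => h ((List.singleton_infix_iff _ _).mp hin))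
  by_cases hl : evaluate_pattern_leniently cs criteria = false
  · rw [if_pos hl]
    exact (pvPrune criteria cs [] 0 (by simp)
      (by rwa [evaluate_pattern_leniently, pvBlocks_eq] at hl)).symm
  · rw [if_neg hl, dif_pos hfind]
    have hx := pvExact criteria cs [] 0 h (by simp) (by omega)
    simp only [List.length_nil, Nat.add_zero] at hx
    rw [hx]
    simp only [evaluate_pattern_exactly, pvBlocks_eq]
    by_cases he : (pvTok [] cs).length ≠ criteria.length
    · rw [if_pos he,
        if_neg (show ¬((pvTok [] cs).length = criteria.length ∧
          pvExLoop criteria (pvTok [] cs) 0 = true) from fun hcond => he hcond.1)]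
      simp
    · rw [if_neg he]
      by_cases hex : pvExLoop criteria (pvTok [] cs) 0 = true
      · rw [if_pos hex, if_pos ⟨not_not.mp he, hex⟩]
      · rw [if_neg hex,
          if_neg (show ¬((pvTok [] cs).length = criteria.length ∧
            pvExLoop criteria (pvTok [] cs) 0 = true) from fun hcond => hex hcond.2)]

lemma pvCountA_eq (criteria : List Int) :
    ∀ (n : Nat) (cs : List Char), cs.count '?' ≤ n → countA criteria cs = goB criteria cs 0 0 := by
  intro n
  induction n with
  | zero =>
    intro cs hc
    refine pvNoQ criteria cs (fun hm => ?_)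
    have := List.count_pos_iff.mpr hm
    omega
  | succ n ih =>
    intro cs hc
    by_cases h : '?' ∈ cs
    · obtain ⟨a, b, hqa, hab, hrep⟩ := pvReplaceFirst_decomp cs h
      rw [countA]
      by_cases hl : evaluate_pattern_leniently cs criteria = false
      · rw [if_pos hl]
        exact (pvPrune criteria cs [] 0 (by simp)
          (by rwa [evaluate_pattern_leniently, pvBlocks_eq] at hl)).symm
      · rw [if_neg hl]
        have hfind : ¬ PySem.Chars.find cs ['?'] = -1 :=
          (PySem.Chars.find_ne_neg_one_iff _ _).mpr ((List.singleton_infix_iff _ _).mpr h)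
        rw [dif_neg hfind]
        have hcount : ∀ c : Char, c ≠ '?' → (a ++ c :: b).count '?' ≤ n := by
          intro c hc'
          have h0 : a.count '?' = 0 := List.count_eq_zero.mpr hqa
          have h1 : cs.count '?' = a.count '?' + (b.count '?' + 1) := by
            rw [hab, List.count_append, List.count_cons]
            simp
          have h2 : (a ++ c :: b).count '?' = a.count '?' + b.count '?' := by
            rw [List.count_append, List.count_cons]
            simp [hc']
          omega
        rw [hrep '.', hrep '#', ih _ (hcount '.' (by decide)), ih _ (hcount '#' (by decide)), hab]
        exact (pvSplitQ criteria a b 0 0 hqa).symm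
    · exact pvNoQ criteria cs h

-- ===== VERDICT (by name: the statement is the Claim_ definition above) =====
theorem count_of_possible_patterns_spec : Claim_equal_count_of_possible_patterns := by
  intro pattern criteria _
  unfold Spec_count_of_possible_patterns count_of_possible_patterns count_of_possible_patterns_alt
  exact pvCountA_eq criteria (pattern.toList.count '?') pattern.toList le_rfl
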